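-- pv_equiv track=rewrite | github.com/karan123789/Circular-Double-Ended-Queues-Project | Project 4.py | maximize_profits
-- ===== SOURCE A (Python) =====
-- from typing import TypeVar, List, Optional
--
-- def maximize_profits(profits: List[int], k: int) -> int:
--     """
--     Takes in a pay period (as a list of profits), a work interval k,
--     and returns the maximum profit that can be made within the pay period
--
--     :param profits: A list of profits representing the amount of money made (or lost) for a given day
--     :param k: A work interval. You must work at least once every k days.
--     :return: The maximum possible profit obtainable within the pay period
--     """
--     num_days = len(profits)  # Number of days in the pay period
--     max_profit = [0] * (num_days + 1)  # Initialize the max_profit list with zeros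
--     deque = []  # Initialize an empty deque
--     deque_front = 0  # Initialize the front of the deque
--     deque_rear = -1  # Initialize the rear of the deque
--
--     day = 1  # Initialize the current day
--
--     while day <= num_days:  # Iterate over each day in the pay period
--         # Remove elements of deque which are out of this window
--         while deque_front <= deque_rear and deque[deque_front] < day - k:
--             deque_front += 1
--
--         # Update the max_profit for the current day
--         if deque_front <= deque_rear:
--             max_profit[day] = profits[day - 1] + max_profit[deque[deque_front]]
--         else:
--             max_profit[day] = profits[day - 1]
--
--         # Remove all elements smaller than the current from deque
--         for idx in range(deque_rear, deque_front - 1, -1):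
--             if max_profit[day] >= max_profit[deque[idx]]:
--                 deque_rear -= 1
--             else:
--                 break
--
--         deque.append(None)  # Add a new element to the deque
--         deque_rear += 1  # Increment the rear of the deque
--         deque[deque_rear] = day  # Update the rear of the deque to the current day
--
--         day += 1  # Move to the next day
--
--     return max_profit[-1]  # Return the maximum profit
-- ===== SOURCE B (Python) =====
-- def maximize_profits(profits, k):
--     """
--     Naive window-scan DP: dp[day] = profits[day-1] plus the best dp value among
--     the previous days in the window [day-k, day-1], scanned directly.
--     """
--     num_days = len(profits)
--     max_profit = [0] * (num_days + 1)
--     for day in range(1, num_days + 1):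
--         best = None
--         for j in range(max(1, day - k), day):
--             if best is None or max_profit[j] > best:
--                 best = max_profit[j]
--         max_profit[day] = profits[day - 1] + (best if best is not None else 0)
--     return max_profit[-1]
-- ===== Notes on version B (the rewrite author's own statement) =====
-- stated objective: simpler
-- what changed: Replaces A's monotonic deque with front/rear index juggling by a plain DP that rescans the k-day window for each day, tracking the running maximum with a None flag.
import Mathlib
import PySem

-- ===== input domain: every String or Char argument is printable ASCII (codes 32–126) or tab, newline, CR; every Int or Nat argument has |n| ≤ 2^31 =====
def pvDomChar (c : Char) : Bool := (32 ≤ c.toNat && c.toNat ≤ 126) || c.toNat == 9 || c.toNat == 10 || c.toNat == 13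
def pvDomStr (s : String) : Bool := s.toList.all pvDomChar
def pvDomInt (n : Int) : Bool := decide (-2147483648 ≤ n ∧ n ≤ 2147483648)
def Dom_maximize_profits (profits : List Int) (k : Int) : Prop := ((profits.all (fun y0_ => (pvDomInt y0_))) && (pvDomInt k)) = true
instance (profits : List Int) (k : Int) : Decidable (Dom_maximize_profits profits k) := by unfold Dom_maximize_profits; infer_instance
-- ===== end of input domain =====

-- B replaces A's monotonic-deque window maximum with a direct scan of the k-day window
-- for each day: a simpler O(n*k) DP instead of the pointer-juggling O(n) deque (objective: simpler).

-- ===== PORT A =====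
-- while deque_front <= deque_rear and deque[deque_front] < day - k: deque_front += 1
def trimFrontA (deq : List Int) (r lim f : Int) : Int :=
  if h : f ≤ r ∧ PySem.List.pyGetD deq f 0 < lim then trimFrontA deq r lim (f + 1) else f
  termination_by (r + 1 - f).toNat
  decreasing_by omega

-- for idx in range(deque_rear, deque_front - 1, -1): if max_profit[day] >= max_profit[deque[idx]]:
--   deque_rear -= 1 else break  — idx always equals the current rear, so the loop is this recursion on rear
def popRearA (deq dp : List Int) (v f r : Int) : Int :=
  if h : f ≤ r then
    if v ≥ PySem.List.pyGetD dp (PySem.List.pyGetD deq r 0) 0 then popRearA deq dp v f (r - 1) else r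
  else r
  termination_by (r + 1 - f).toNat
  decreasing_by omega

-- one iteration of A's `while day <= num_days` loop; state = (max_profit, deque, deque_front, deque_rear)
def stepA (profits : List Int) (k : Int) (st : List Int × List Int × Int × Int) (day : Nat) :
    List Int × List Int × Int × Int :=
  let dp := st.1; let deq := st.2.1; let f0 := st.2.2.1; let r := st.2.2.2
  let f := trimFrontA deq r ((day : Int) - k) f0
  let dp :=
    if f ≤ r then
      PySem.List.pySetD dp (day : Int)
        (PySem.List.pyGetD profits ((day : Int) - 1) 0 +
          PySem.List.pyGetD dp (PySem.List.pyGetD deq f 0) 0)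
    else
      PySem.List.pySetD dp (day : Int) (PySem.List.pyGetD profits ((day : Int) - 1) 0)
  let r := popRearA deq dp (PySem.List.pyGetD dp (day : Int) 0) f r
  -- deque.append(None); deque_rear += 1; deque[deque_rear] = day  (the None placeholder, modeled
  -- as 0, is either immediately overwritten here or never read afterwards)
  let deq := PySem.List.pySetD (deq ++ [0]) (r + 1) (day : Int)
  (dp, deq, f, r + 1)

def maximize_profits (profits : List Int) (k : Int) : Int :=
  let num_days := profits.length
  let init : List Int × List Int × Int × Int := (List.replicate (num_days + 1) 0, [], 0, -1)
  let fin := (List.range' 1 num_days).foldl (stepA profits k) init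
  PySem.List.pyGetD fin.1 (-1) 0

-- ===== PORT B =====
-- best = None; for j in range(max(1, day - k), day): best = max_profit[j] if it beats best
def bestB (dp : List Int) (k : Int) (day : Nat) : Option Int :=
  (PySem.List.pyRange (max 1 ((day : Int) - k)) (day : Int) 1).foldl
    (fun best j =>
      match best with
      | none => some (PySem.List.pyGetD dp j 0)
      | some b => if PySem.List.pyGetD dp j 0 > b then some (PySem.List.pyGetD dp j 0) else some b)
    none

def stepB (profits : List Int) (k : Int) (dp : List Int) (day : Nat) : List Int :=
  PySem.List.pySetD dp (day : Int)
    (PySem.List.pyGetD profits ((day : Int) - 1) 0 +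
      match bestB dp k day with
      | none => 0
      | some b => b)

def maximize_profits_alt (profits : List Int) (k : Int) : Int :=
  let num_days := profits.length
  let dp := (List.range' 1 num_days).foldl (stepB profits k) (List.replicate (num_days + 1) 0)
  PySem.List.pyGetD dp (-1) 0

-- ===== PRECONDITION & SPEC =====
def Spec_maximize_profits (profits : List Int) (k : Int) (out : Int) : Prop := out = maximize_profits_alt profits k
instance (profits : List Int) (k : Int) (out : Int) : Decidable (Spec_maximize_profits profits k out) := by unfold Spec_maximize_profits; infer_instance

-- ===== CLAIM (what is proved, stated in full; the proofs are below) =====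
def Claim_equal_maximize_profits : Prop := ∀ (profits : List Int) (k : Int), Dom_maximize_profits profits k → Spec_maximize_profits profits k (maximize_profits profits k)

-- ===== LEMMAS AND PROOFS =====

-- dp lookup as both programs perform it
def dpv (dp : List Int) (j : Int) : Int := PySem.List.pyGetD dp j 0

-- the live portion deque[f .. r] of A's deque
def qOf (deq : List Int) (f r : Int) : List Int := (deq.drop f.toNat).take (r + 1 - f).toNat

-- B's dp list after the first d days
def dpB (profits : List Int) (k : Int) (d : Nat) : List Int :=
  (List.range' 1 d).foldl (stepB profits k) (List.replicate (profits.length + 1) 0)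

-- A's full loop invariant after the first d days
structure InvA (profits : List Int) (k : Int) (d : Nat) (dp deq : List Int) (f r : Int) : Prop where
  hdp : dp = dpB profits k d
  hlen : dp.length = profits.length + 1
  hdlen : deq.length = d
  hd : d ≤ profits.length
  hf : 0 ≤ f
  hfr : f ≤ r + 1
  hr : r + 1 ≤ (d : Int)
  hmem : ∀ e ∈ qOf deq f r, 1 ≤ e ∧ e ≤ (d : Int)
  hsort : (qOf deq f r).Pairwise (· < ·)
  hdec : (qOf deq f r).Pairwise (fun a b => dpv dp b < dpv dp a)
  hlast : 1 ≤ d → ((d : Int)) ∈ qOf deq f r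
  hcov : ∀ j : Int, 1 ≤ j → j ≤ (d : Int) → (d : Int) + 1 - k ≤ j →
    ∃ e ∈ qOf deq f r, j ≤ e ∧ dpv dp j ≤ dpv dp e

theorem qOf_nil (deq : List Int) (f r : Int) (h : r + 1 ≤ f) : qOf deq f r = [] := by
  unfold qOf
  have : (r + 1 - f).toNat = 0 := by omega
  simp [this]

theorem qOf_cons (deq : List Int) (f r : Int) (h0 : 0 ≤ f) (h1 : f ≤ r)
    (h2 : r < (deq.length : Int)) :
    qOf deq f r = deq[f.toNat]'(by omega) :: qOf deq (f + 1) r := by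
  unfold qOf
  have hf : f.toNat < deq.length := by omega
  rw [List.drop_eq_getElem_cons hf]
  have h3 : (r + 1 - f).toNat = (r + 1 - (f + 1)).toNat + 1 := by omega
  rw [h3, List.take_succ_cons]
  have h4 : (f + 1).toNat = f.toNat + 1 := by omega
  rw [h4]

theorem qOf_concat (deq : List Int) (f r : Int) (h0 : 0 ≤ f) (h1 : f ≤ r)
    (h2 : r < (deq.length : Int)) :
    qOf deq f r = qOf deq f (r - 1) ++ [deq[r.toNat]'(by omega)] := by
  unfold qOf
  have h3 : (r + 1 - f).toNat = (r - 1 + 1 - f).toNat + 1 := by omega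
  rw [h3, List.take_add_one]
  congr 1
  have h5 : (deq.drop f.toNat)[(r - 1 + 1 - f).toNat]? = some (deq[r.toNat]'(by omega)) := by
    rw [List.getElem?_drop]
    have h6 : f.toNat + (r - 1 + 1 - f).toNat = r.toNat := by omega
    rw [h6, List.getElem?_eq_getElem (by omega)]
  rw [h5]
  rfl

-- trimFrontA computes dropWhile (< lim) on the live slice
theorem trim_spec (deq : List Int) (r lim : Int) :
    ∀ f, 0 ≤ f → f ≤ r + 1 → r < (deq.length : Int) →
    f ≤ trimFrontA deq r lim f ∧ trimFrontA deq r lim f ≤ r + 1 ∧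
      qOf deq (trimFrontA deq r lim f) r = (qOf deq f r).dropWhile (fun e => decide (e < lim)) := by
  suffices H : ∀ (n : Nat) (f : Int), (r + 1 - f).toNat ≤ n → 0 ≤ f → f ≤ r + 1 →
      r < (deq.length : Int) →
      f ≤ trimFrontA deq r lim f ∧ trimFrontA deq r lim f ≤ r + 1 ∧
        qOf deq (trimFrontA deq r lim f) r = (qOf deq f r).dropWhile (fun e => decide (e < lim)) by
    intro f h0 h1 h2; exact H (r + 1 - f).toNat f le_rfl h0 h1 h2
  intro n
  induction n with
  | zero =>
    intro f hn h0 h1 h2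
    have hf : f = r + 1 := by omega
    rw [trimFrontA]
    have hc : ¬(f ≤ r ∧ PySem.List.pyGetD deq f 0 < lim) := by omega
    rw [dif_neg hc]
    refine ⟨le_rfl, h1, ?_⟩
    rw [qOf_nil deq f r (by omega)]
    simp
  | succ n ih =>
    intro f hn h0 h1 h2
    rw [trimFrontA]
    by_cases hc : f ≤ r ∧ PySem.List.pyGetD deq f 0 < lim
    · rw [dif_pos hc]
      obtain ⟨hfr', hlt⟩ := hc
      obtain ⟨ih1, ih2, ih3⟩ := ih (f + 1) (by omega) (by omega) (by omega) h2
      refine ⟨by omega, ih2, ?_⟩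
      rw [ih3, qOf_cons deq f r h0 hfr' h2, List.dropWhile_cons]
      have hg : PySem.List.pyGetD deq f 0 = deq[f.toNat]'(by omega) :=
        PySem.List.pyGetD_eq_getElem deq 0 h0 (by omega)
      rw [hg] at hlt
      simp [hlt]
    · rw [dif_neg hc]
      refine ⟨le_rfl, h1, ?_⟩
      by_cases hfr' : f ≤ r
      · have hnlt : ¬ PySem.List.pyGetD deq f 0 < lim := by tauto
        rw [qOf_cons deq f r h0 hfr' h2, List.dropWhile_cons]
        have hg : PySem.List.pyGetD deq f 0 = deq[f.toNat]'(by omega) :=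
          PySem.List.pyGetD_eq_getElem deq 0 h0 (by omega)
        rw [hg] at hnlt
        simp [hnlt]
      · rw [qOf_nil deq f r (by omega)]
        simp

-- popRearA splits the live slice into a kept prefix and a dropped suffix
theorem pop_spec (deq dp : List Int) (v : Int) (f : Int) :
    ∀ r, 0 ≤ f → f ≤ r + 1 → r < (deq.length : Int) →
    f ≤ popRearA deq dp v f r + 1 ∧ popRearA deq dp v f r ≤ r ∧
      qOf deq f r = qOf deq f (popRearA deq dp v f r) ++ qOf deq (popRearA deq dp v f r + 1) r ∧
      (∀ e ∈ qOf deq (popRearA deq dp v f r + 1) r, dpv dp e ≤ v) ∧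
      (f ≤ popRearA deq dp v f r → v < dpv dp (PySem.List.pyGetD deq (popRearA deq dp v f r) 0)) := by
  suffices H : ∀ (n : Nat) (r : Int), (r + 1 - f).toNat ≤ n → 0 ≤ f → f ≤ r + 1 →
      r < (deq.length : Int) →
      f ≤ popRearA deq dp v f r + 1 ∧ popRearA deq dp v f r ≤ r ∧
      qOf deq f r = qOf deq f (popRearA deq dp v f r) ++ qOf deq (popRearA deq dp v f r + 1) r ∧
      (∀ e ∈ qOf deq (popRearA deq dp v f r + 1) r, dpv dp e ≤ v) ∧
      (f ≤ popRearA deq dp v f r → v < dpv dp (PySem.List.pyGetD deq (popRearA deq dp v f r) 0)) by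
    intro r h0 h1 h2; exact H (r + 1 - f).toNat r le_rfl h0 h1 h2
  intro n
  induction n with
  | zero =>
    intro r hn h0 h1 h2
    have hfr : ¬ f ≤ r := by omega
    rw [popRearA, dif_neg hfr]
    refine ⟨h1, le_rfl, ?_, ?_, ?_⟩
    · rw [qOf_nil deq (r + 1) r (by omega)]; simp
    · rw [qOf_nil deq (r + 1) r (by omega)]; simp
    · intro h; omega
  | succ n ih =>
    intro r hn h0 h1 h2
    rw [popRearA]
    by_cases hfr : f ≤ r
    · rw [dif_pos hfr]
      by_cases hv : v ≥ PySem.List.pyGetD dp (PySem.List.pyGetD deq r 0) 0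
      · rw [if_pos hv]
        obtain ⟨ih1, ih2, ih3, ih4, ih5⟩ := ih (r - 1) (by omega) h0 (by omega) (by omega)
        set r' := popRearA deq dp v f (r - 1) with hr'
        have hconcat := qOf_concat deq f r h0 hfr h2
        have hconcat2 := qOf_concat deq (r' + 1) r (by omega) (by omega) h2
        have hget : PySem.List.pyGetD deq r 0 = deq[r.toNat]'(by omega) :=
          PySem.List.pyGetD_eq_getElem deq 0 (by omega) (by omega)
        refine ⟨ih1, by omega, ?_, ?_, ih5⟩
        · rw [hconcat, hconcat2, ih3]
          simp
        · intro e he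
          rw [hconcat2] at he
          rcases List.mem_append.mp he with h | h
          · exact ih4 e h
          · have : e = deq[r.toNat]'(by omega) := by simpa using h
            rw [this]
            rw [hget] at hv
            exact hv
      · rw [if_neg hv]
        refine ⟨by omega, le_rfl, ?_, ?_, ?_⟩
        · rw [qOf_nil deq (r + 1) r (by omega)]; simp
        · rw [qOf_nil deq (r + 1) r (by omega)]; simp
        · intro _; exact lt_of_not_ge hv
    · rw [dif_neg hfr]
      refine ⟨h1, le_rfl, ?_, ?_, ?_⟩
      · rw [qOf_nil deq (r + 1) r (by omega)]; simp
      · rw [qOf_nil deq (r + 1) r (by omega)]; simp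
      · intro h; omega

-- B's inner fold is the maximum of the window values
theorem bestB_eq_max? (dp : List Int) (k : Int) (day : Nat) :
    bestB dp k day =
      ((PySem.List.pyRange (max 1 ((day : Int) - k)) (day : Int) 1).map (dpv dp)).max? := by
  unfold bestB
  generalize PySem.List.pyRange (max 1 ((day : Int) - k)) (day : Int) 1 = l
  have aux : ∀ (l : List Int) (b : Int),
      l.foldl (fun best j =>
        match best with
        | none => some (PySem.List.pyGetD dp j 0)
        | some b => if PySem.List.pyGetD dp j 0 > b then some (PySem.List.pyGetD dp j 0)
                    else some b) (some b) =
      some (l.foldl (fun b j => max b (dpv dp j)) b) := by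
    intro l
    induction l with
    | nil => intro b; rfl
    | cons a l ih =>
      intro b
      simp only [List.foldl_cons]
      by_cases h : PySem.List.pyGetD dp a 0 > b
      · rw [if_pos h]
        rw [ih]
        congr 1
        congr 1
        exact (max_eq_right (le_of_lt h)).symm
      · rw [if_neg h]
        rw [ih]
        congr 1
        congr 1
        exact (max_eq_left (le_of_not_gt h)).symm
  cases l with
  | nil => rfl
  | cons a l =>
    simp only [List.foldl_cons, List.map_cons]
    rw [aux, List.max?_cons', List.foldl_map]
    rfl

-- the push step: the new live slice is the kept slice with `day` appended
theorem qOf_push (deq : List Int) (f r' : Int) (day : Int)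
    (h0 : 0 ≤ f) (h1 : f ≤ r' + 1) (h2 : r' + 1 ≤ (deq.length : Int)) :
    qOf (PySem.List.pySetD (deq ++ [0]) (r' + 1) day) f (r' + 1) = qOf deq f r' ++ [day] := by
  rw [PySem.List.pySetD_of_nonneg (deq ++ [0]) day (by omega : (0:Int) ≤ r' + 1)]
  have hlset : ((deq ++ [0]).set (r' + 1).toNat day).length = deq.length + 1 := by simp
  apply List.ext_getElem
  · unfold qOf
    simp only [List.length_take, List.length_drop, List.length_append, List.length_set,
      List.length_singleton]
    omega
  · intro i h1i h2i
    unfold qOf at h1i h2i ⊢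
    simp only [List.length_take, List.length_drop, List.length_append, List.length_set,
      List.length_singleton] at h1i h2i
    rw [List.getElem_take, List.getElem_drop]
    have hib : i < (r' + 2 - f).toNat := by omega
    have hfi : f.toNat + i < deq.length + 1 := by omega
    rw [List.getElem_set]
    have hlq : (List.take (r' + 1 - f).toNat (List.drop f.toNat deq)).length
        = (r' + 1 - f).toNat := by
      simp only [List.length_take, List.length_drop]; omega
    by_cases hlastpos : i = (r' + 1 - f).toNat
    · have heq : (r' + 1).toNat = f.toNat + i := by omega
      rw [if_pos heq]
      rw [List.getElem_append_right (by omega)]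
      simp [hlq, hlastpos]
    · have hne : ¬ (r' + 1).toNat = f.toNat + i := by omega
      rw [if_neg hne]
      rw [List.getElem_append_left (by omega)]
      rw [List.getElem_append_left (by omega), List.getElem_take, List.getElem_drop]

-- under the invariant, B's window scan finds exactly the dp value at the trimmed deque front
theorem window_best (dp deq : List Int) (k : Int) (d : Nat) (f r f' : Int)
    (hf' : 0 ≤ f') (hrlen : r < (deq.length : Int))
    (hq' : qOf deq f' r = (qOf deq f r).dropWhile (fun e => decide (e < ((d : Int) + 1 - k))))
    (hmem : ∀ e ∈ qOf deq f r, 1 ≤ e ∧ e ≤ (d : Int))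
    (hdec : (qOf deq f r).Pairwise (fun a b => dpv dp b < dpv dp a))
    (hlast : 1 ≤ d → ((d : Int)) ∈ qOf deq f r)
    (hcov : ∀ j : Int, 1 ≤ j → j ≤ (d : Int) → (d : Int) + 1 - k ≤ j →
      ∃ e ∈ qOf deq f r, j ≤ e ∧ dpv dp j ≤ dpv dp e) :
    bestB dp k (d + 1) = if f' ≤ r then some (dpv dp (PySem.List.pyGetD deq f' 0)) else none := by
  rw [bestB_eq_max?]
  have hcast : ((d + 1 : Nat) : Int) = (d : Int) + 1 := by push_cast; ring
  rw [hcast]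
  set L : Int := (d : Int) + 1 - k with hLdef
  have hsubq' : (qOf deq f' r).Sublist (qOf deq f r) := by
    rw [hq']; exact List.dropWhile_sublist _
  split_ifs with hbr
  · have hcons := qOf_cons deq f' r hf' hbr hrlen
    have hgh0 : PySem.List.pyGetD deq f' 0 = deq[f'.toNat]'(by omega) :=
      PySem.List.pyGetD_eq_getElem deq 0 hf' (by omega)
    set h0 : Int := deq[f'.toNat]'(by omega) with hh0def
    have hq'nil : qOf deq f' r ≠ [] := by rw [hcons]; simp
    have hh0q' : h0 ∈ qOf deq f' r := by rw [hcons]; exact List.mem_cons_self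
    have hh0q : h0 ∈ qOf deq f r := hsubq'.mem hh0q'
    obtain ⟨h1h0, h2h0⟩ := hmem h0 hh0q
    have hh0L : L ≤ h0 := by
      have hw : (qOf deq f r).dropWhile (fun e => decide (e < L)) = h0 :: qOf deq (f' + 1) r := by
        rw [← hq', hcons]
      have hne : (qOf deq f r).dropWhile (fun e => decide (e < L)) ≠ [] := by
        rw [hw]; simp
      have hhd := List.head_dropWhile_not (fun e => decide (e < L)) hne
      simp only [hw, List.head_cons, decide_eq_false_iff_not] at hhd
      omega
    have hdecq' : (qOf deq f' r).Pairwise (fun a b => dpv dp b < dpv dp a) :=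
      hdec.sublist hsubq'
    rw [hgh0]
    rw [List.max?_eq_some_iff]
    constructor
    · exact List.mem_map.mpr ⟨h0, PySem.List.mem_pyRange_one.mpr ⟨by omega, by omega⟩, rfl⟩
    · intro b hb
      obtain ⟨j, hj, rfl⟩ := List.mem_map.mp hb
      obtain ⟨hj1, hj2⟩ := PySem.List.mem_pyRange_one.mp hj
      obtain ⟨e, he, hje, hle⟩ := hcov j (by omega) (by omega) (by omega)
      have heq' : e ∈ qOf deq f' r := by
        rw [← List.takeWhile_append_dropWhile (p := fun e => decide (e < L))
          (l := qOf deq f r)] at he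
        rcases List.mem_append.mp he with ht | hd'
        · have := List.mem_takeWhile_imp ht
          simp only [decide_eq_true_eq] at this
          omega
        · rw [hq']; exact hd'
      have hee : dpv dp e ≤ dpv dp h0 := by
        rw [hcons] at heq'
        rcases List.mem_cons.mp heq' with rfl | htail
        · exact le_rfl
        · rw [hcons] at hdecq'
          exact le_of_lt ((List.pairwise_cons.mp hdecq').1 e htail)
      exact le_trans hle hee
  · have hq'e : qOf deq f' r = [] := qOf_nil deq f' r (by omega)
    have hrange : PySem.List.pyRange (max 1 L) ((d : Int) + 1) 1 = [] := by
      apply PySem.List.pyRange_one_eq_nil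
      by_cases hd1 : 1 ≤ d
      · have hdq := hlast hd1
        have hall := List.dropWhile_eq_nil_iff.mp (hq' ▸ hq'e)
        have := hall _ hdq
        simp only [decide_eq_true_eq] at this
        omega
      · have : d = 0 := by omega
        subst this
        simp
    rw [hrange]
    rfl

theorem inv_step (profits : List Int) (k : Int) (d : Nat) (dp deq : List Int) (f r : Int)
    (hI : InvA profits k d dp deq f r) (hdn : d < profits.length) :
    let st := stepA profits k (dp, deq, f, r) (d + 1)
    InvA profits k (d + 1) st.1 st.2.1 st.2.2.1 st.2.2.2 := by
  obtain ⟨hdp, hlen, hdlen, hd, hf, hfr, hr, hmem, hsort, hdec, hlast, hcov⟩ := hI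
  have hcast : ((d + 1 : Nat) : Int) = (d : Int) + 1 := by push_cast; ring
  have hrlen : r < (deq.length : Int) := by omega
  obtain ⟨hff', hf'r1, hq'⟩ := trim_spec deq r (((d + 1 : Nat) : Int) - k) f hf hfr hrlen
  set f' := trimFrontA deq r (((d + 1 : Nat) : Int) - k) f with hf'def
  rw [hcast] at hq'
  have hf'0 : 0 ≤ f' := by omega
  have hbest := window_best dp deq k d f r f' hf'0 hrlen hq' hmem hdec hlast hcov
  set p : Int := PySem.List.pyGetD profits (((d + 1 : Nat) : Int) - 1) 0 with hpdef
  set vA : Int := if f' ≤ r then p + dpv dp (PySem.List.pyGetD deq f' 0) else p with hvAdef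
  set dp₂ : List Int := PySem.List.pySetD dp ((d + 1 : Nat) : Int) vA with hdp2def
  have hstepB : stepB profits k dp (d + 1) = dp₂ := by
    unfold stepB
    rw [hbest, hdp2def, hvAdef]
    split_ifs with hbr
    · rfl
    · rw [add_zero]
  have hpres : ∀ j : Int, 0 ≤ j → j ≤ (d : Int) → dpv dp₂ j = dpv dp j := by
    intro j hj0 hjd
    have hjcast : j = ((j.toNat : Nat) : Int) := by omega
    rw [hdp2def, dpv, dpv, hjcast,
      PySem.List.pyGetD_pySetD_natCast dp (d + 1) j.toNat vA 0 (by omega),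
      if_neg (by omega)]
  have hnew : dpv dp₂ ((d + 1 : Nat) : Int) = vA := by
    rw [hdp2def, dpv,
      PySem.List.pyGetD_pySetD_natCast dp (d + 1) (d + 1) vA 0 (by omega), if_pos rfl]
  have hdpA2 : (if f' ≤ r then
        PySem.List.pySetD dp ((d + 1 : Nat) : Int)
          (PySem.List.pyGetD profits (((d + 1 : Nat) : Int) - 1) 0 +
            PySem.List.pyGetD dp (PySem.List.pyGetD deq f' 0) 0)
      else
        PySem.List.pySetD dp ((d + 1 : Nat) : Int)
          (PySem.List.pyGetD profits (((d + 1 : Nat) : Int) - 1) 0)) = dp₂ := by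
    rw [hdp2def, hvAdef]
    split_ifs <;> rfl
  obtain ⟨hp1, hp2, hsplit, hdrop, hlastp⟩ :=
    pop_spec deq dp₂ (PySem.List.pyGetD dp₂ ((d + 1 : Nat) : Int) 0) f' r hf'0 hf'r1 hrlen
  set r' := popRearA deq dp₂ (PySem.List.pyGetD dp₂ ((d + 1 : Nat) : Int) 0) f' r with hr'def
  set deq₂ : List Int := PySem.List.pySetD (deq ++ [0]) (r' + 1) ((d + 1 : Nat) : Int)
    with hdeq2def
  have hpush : qOf deq₂ f' (r' + 1) = qOf deq f' r' ++ [((d + 1 : Nat) : Int)] :=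
    qOf_push deq f' r' ((d + 1 : Nat) : Int) hf'0 hp1 (by omega)
  have hsubq' : (qOf deq f' r).Sublist (qOf deq f r) := by
    rw [hq']; exact List.dropWhile_sublist _
  have hkq'sub : (qOf deq f' r').Sublist (qOf deq f' r) := by
    rw [hsplit]; exact List.sublist_append_left _ _
  have hkq : (qOf deq f' r').Sublist (qOf deq f r) := hkq'sub.trans hsubq'
  have hmemk : ∀ x ∈ qOf deq f' r', 1 ≤ x ∧ x ≤ (d : Int) := fun x hx => hmem x (hkq.mem hx)
  have hdeck : (qOf deq f' r').Pairwise (fun a b => dpv dp₂ b < dpv dp₂ a) := by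
    refine (hdec.sublist hkq).imp_of_mem ?_
    intro a b ha hb hab
    rw [hpres a (by have := hmemk a ha; omega) (by have := hmemk a ha; omega),
      hpres b (by have := hmemk b hb; omega) (by have := hmemk b hb; omega)]
    exact hab
  have hkeptgt : ∀ e ∈ qOf deq f' r', vA < dpv dp₂ e := by
    intro e he
    by_cases hfr'' : f' ≤ r'
    · have hcat := qOf_concat deq f' r' hf'0 hfr'' (by omega)
      have hglast : PySem.List.pyGetD deq r' 0 = deq[r'.toNat]'(by omega) :=
        PySem.List.pyGetD_eq_getElem deq 0 (by omega) (by omega)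
      have hlastv : vA < dpv dp₂ (deq[r'.toNat]'(by omega)) := by
        have := hlastp hfr''
        rw [hglast] at this
        rw [← hnew]
        exact this
      rw [hcat] at he
      rcases List.mem_append.mp he with hinit | hlaste
      · rw [hcat] at hdeck
        obtain ⟨_, _, hcross⟩ := List.pairwise_append.mp hdeck
        have := hcross e hinit _ (List.mem_singleton_self _)
        omega
      · have : e = deq[r'.toNat]'(by omega) := by simpa using hlaste
        rw [this]
        exact hlastv
    · rw [qOf_nil deq f' r' (by omega)] at he
      simp at he
  have hstA : stepA profits k (dp, deq, f, r) (d + 1) = (dp₂, deq₂, f', r' + 1) := by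
    unfold stepA
    dsimp only
    rw [← hf'def, hdpA2, ← hr'def, ← hdeq2def]
  dsimp only
  rw [hstA]
  dsimp only
  refine ⟨?_, ?_, ?_, by omega, by omega, by omega, by push_cast; omega, ?_, ?_, ?_, ?_, ?_⟩
  · -- hdp
    have hBconcat : dpB profits k (d + 1) = stepB profits k (dpB profits k d) (d + 1) := by
      unfold dpB
      rw [List.range'_concat, List.foldl_append]
      simp [Nat.add_comm]
    rw [hBconcat, ← hdp]
    exact hstepB.symm
  · -- hlen
    rw [hdp2def, PySem.List.length_pySetD]; exact hlen
  · -- hdlen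
    rw [hdeq2def, PySem.List.length_pySetD]; simp [hdlen]
  · -- hmem
    intro e he
    rw [hpush] at he
    rcases List.mem_append.mp he with hk | hl
    · have := hmemk e hk; push_cast; omega
    · have : e = ((d + 1 : Nat) : Int) := by simpa using hl
      rw [this]; push_cast; omega
  · -- hsort
    rw [hpush]
    refine List.pairwise_append.mpr ⟨hsort.sublist hkq, List.pairwise_singleton _ _, ?_⟩
    intro a ha b hb
    have hb' : b = ((d + 1 : Nat) : Int) := by simpa using hb
    have := hmemk a ha
    rw [hb']; push_cast; omega
  · -- hdec
    rw [hpush]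
    refine List.pairwise_append.mpr ⟨hdeck, List.pairwise_singleton _ _, ?_⟩
    intro a ha b hb
    have hb' : b = ((d + 1 : Nat) : Int) := by simpa using hb
    rw [hb', hnew]
    exact hkeptgt a ha
  · -- hlast
    intro _
    rw [hpush]
    exact List.mem_append_right _ (List.mem_singleton_self _)
  · -- hcov
    intro j hj1 hjd1 hjk
    rw [hcast] at hjd1 hjk
    by_cases hjd : j = ((d + 1 : Nat) : Int)
    · exact ⟨((d + 1 : Nat) : Int), by rw [hpush]; exact List.mem_append_right _ (List.mem_singleton_self _), by omega, by rw [hjd]⟩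
    · have hjd' : j ≤ (d : Int) := by
        have : j ≠ (d : Int) + 1 := by rw [hcast] at hjd; exact hjd
        omega
      obtain ⟨e, he, hje, hle⟩ := hcov j hj1 hjd' (by omega)
      obtain ⟨he1, he2⟩ := hmem e he
      have heq' : e ∈ qOf deq f' r := by
        rw [← List.takeWhile_append_dropWhile (p := fun e => decide (e < ((d : Int) + 1 - k)))
          (l := qOf deq f r)] at he
        rcases List.mem_append.mp he with ht | hd'
        · have := List.mem_takeWhile_imp ht
          simp only [decide_eq_true_eq] at this
          omega
        · rw [hq']; exact hd'
      rw [hsplit] at heq'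
      rcases List.mem_append.mp heq' with hk | hl
      · refine ⟨e, by rw [hpush]; exact List.mem_append_left _ hk, hje, ?_⟩
        rw [hpres j (by omega) (by omega), hpres e (by omega) (by omega)]
        exact hle
      · refine ⟨((d + 1 : Nat) : Int), by rw [hpush]; exact List.mem_append_right _ (List.mem_singleton_self _), by omega, ?_⟩
        have h1 : dpv dp₂ j = dpv dp j := hpres j (by omega) (by omega)
        have h2 : dpv dp₂ e = dpv dp e := hpres e (by omega) (by omega)
        have h3 := hdrop e hl
        have h4 : dpv dp₂ ((d + 1 : Nat) : Int) = PySem.List.pyGetD dp₂ ((d + 1 : Nat) : Int) 0 := rfl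
        omega

theorem inv_main (profits : List Int) (k : Int) :
    ∀ d, d ≤ profits.length →
    let st := (List.range' 1 d).foldl (stepA profits k)
      (List.replicate (profits.length + 1) 0, [], 0, -1)
    InvA profits k d st.1 st.2.1 st.2.2.1 st.2.2.2 := by
  intro d
  induction d with
  | zero =>
    intro _
    dsimp only [List.range', List.foldl_nil]
    have hq : qOf [] 0 (-1) = [] := qOf_nil [] 0 (-1) (by omega)
    refine ⟨rfl, by simp, rfl, Nat.zero_le _, le_rfl, by omega, by omega, ?_, ?_, ?_, ?_, ?_⟩
    · rw [hq]; intro e he; simp at he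
    · rw [hq]; exact List.Pairwise.nil
    · rw [hq]; exact List.Pairwise.nil
    · intro h; omega
    · intro j h1 h2 _; omega
  | succ d ih =>
    intro hd1
    have hIH := ih (Nat.le_of_succ_le hd1)
    dsimp only at hIH
    have hst := inv_step profits k d _ _ _ _ hIH (by omega)
    dsimp only at hst ⊢
    rw [List.range'_concat, List.foldl_append]
    simp only [Nat.one_mul, List.foldl_cons, List.foldl_nil]
    rw [Nat.add_comm 1 d]
    exact hst

-- ===== VERDICT (by name: the statement is the Claim_ definition above) =====
theorem maximize_profits_spec : Claim_equal_maximize_profits := by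
  intro profits k _
  unfold Spec_maximize_profits maximize_profits maximize_profits_alt
  dsimp only
  have h := inv_main profits k profits.length le_rfl
  simp only at h
  rw [h.hdp]
  rfl
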